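-- pv_equiv track=rewrite | github.com/pypi-data/pypi-mirror-397 | packages/lightworks/lightworks-2.3.2-py3-none-any.whl/lightworks/qubit/converter/utils.py | convert_two_qubits_to_adjacent
-- ===== SOURCE A (Python) =====
-- def convert_two_qubits_to_adjacent(
--     q0: int, q1: int
-- ) -> tuple[int, int, list[tuple[int, int]]]:
--     """
--     Takes two qubit indices and converts these so that they are adjacent to each
--     other, and determining the swaps required for this. The order of the two
--     qubits is preserved, so if q0 > q1 then this will remain True.
--
--     Args:
--
--         q0 (int) : First qubit which a gate acts on.
--
--         q1 (int) : The second qubit which the gate acts on.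
--
--     Returns:
--
--         int : The new first qubit which the gate should act on.
--
--         int : The new second qubit which the gate should act on.
--
--         list[tuple] : Pairs of qubits which swap gates should be applied to
--             ensure the gate can act on the right qubits.
--
--     """
--     if abs(q1 - q0) == 1:
--         return (q0, q1, [])
--     swaps = []
--     new_upper = max(q0, q1)
--     new_lower = min(q0, q1)
--     # Bring modes closer together until they are adjacent
--     while new_upper - new_lower != 1:
--         new_upper -= 1
--         if new_upper - new_lower == 1:
--             break
--         new_lower += 1
--     if min(q0, q1) != new_lower:
--         swaps.append((min(q0, q1), new_lower))
--     if max(q0, q1) != new_upper: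
--         swaps.append((max(q0, q1), new_upper))
--     if q0 < q1:
--         q0, q1 = new_lower, new_upper
--     else:
--         q0, q1 = new_upper, new_lower
--     return (q0, q1, swaps)
-- ===== SOURCE B (Python) =====
-- def convert_two_qubits_to_adjacent(q0, q1):
--     lower, upper = min(q0, q1), max(q0, q1)
--     d = upper - lower
--     if d == 1:
--         return (q0, q1, [])
--     # closed-form midpoint: the loop in A moves both ends inward, ending at
--     # new_lower = lower + (d-1)//2 and new_upper = new_lower + 1
--     new_lower = lower + (d - 1) // 2
--     new_upper = new_lower + 1
--     swaps = []
--     if lower != new_lower: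
--         swaps.append((lower, new_lower))
--     if upper != new_upper:
--         swaps.append((upper, new_upper))
--     return (new_lower, new_upper, swaps) if q0 < q1 else (new_upper, new_lower, swaps)
-- ===== Notes on version B (the rewrite author's own statement) =====
-- stated objective: faster
-- what changed: Replaced A's step-by-step loop that walks the two endpoints inward by the closed-form midpoint new_lower = min + (d-1)//2, new_upper = new_lower + 1, so no loop at all; Pre_ excludes q0 == q1, on which A's while-loop never terminates.
import Mathlib
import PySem

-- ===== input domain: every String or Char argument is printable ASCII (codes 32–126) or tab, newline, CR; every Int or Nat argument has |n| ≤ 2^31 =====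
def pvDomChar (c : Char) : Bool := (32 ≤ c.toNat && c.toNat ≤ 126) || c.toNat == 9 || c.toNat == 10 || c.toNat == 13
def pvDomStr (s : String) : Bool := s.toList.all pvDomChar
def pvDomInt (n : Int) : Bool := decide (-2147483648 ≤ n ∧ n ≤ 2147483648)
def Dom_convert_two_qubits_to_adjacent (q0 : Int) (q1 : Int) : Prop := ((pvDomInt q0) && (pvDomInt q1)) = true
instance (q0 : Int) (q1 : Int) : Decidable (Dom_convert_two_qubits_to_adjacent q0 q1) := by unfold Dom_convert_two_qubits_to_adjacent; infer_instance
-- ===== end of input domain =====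

-- B replaces A's step-by-step inward-walking loop by the closed-form midpoint; A diverges when q0 = q1 (excluded by Pre_).

-- ===== PORT A =====
-- the 'while new_upper - new_lower != 1' loop of A; when the gap is ≤ 0 Python loops
-- forever, so the final branch (returning the current state) is only a totality guard,
-- reached exactly outside Pre_.
def pvALoop (upper lower : Int) : Int × Int :=
  if upper - lower = 1 then (upper, lower)
  else if h : 2 ≤ upper - lower then
    if (upper - 1) - lower = 1 then (upper - 1, lower)
    else pvALoop (upper - 1) (lower + 1)
  else (upper, lower)
termination_by (upper - lower).toNat
decreasing_by
  have : (upper - 1 - (lower + 1)) = upper - lower - 2 := by ring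
  omega

def convert_two_qubits_to_adjacent (q0 : Int) (q1 : Int) : Int × Int × (List (Int × Int)) :=
  if (q1 - q0).natAbs = 1 then (q0, q1, [])
  else
    let p := pvALoop (max q0 q1) (min q0 q1)
    let new_upper := p.1
    let new_lower := p.2
    let swaps :=
      (if min q0 q1 ≠ new_lower then [(min q0 q1, new_lower)] else []) ++
      (if max q0 q1 ≠ new_upper then [(max q0 q1, new_upper)] else [])
    if q0 < q1 then (new_lower, new_upper, swaps) else (new_upper, new_lower, swaps)

-- ===== PORT B =====
def convert_two_qubits_to_adjacent_alt (q0 : Int) (q1 : Int) : Int × Int × (List (Int × Int)) :=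
  let lower := min q0 q1
  let upper := max q0 q1
  let d := upper - lower
  if d = 1 then (q0, q1, [])
  else
    let new_lower := lower + PySem.Int.floordiv (d - 1) 2
    let new_upper := new_lower + 1
    let swaps :=
      (if lower ≠ new_lower then [(lower, new_lower)] else []) ++
      (if upper ≠ new_upper then [(upper, new_upper)] else [])
    if q0 < q1 then (new_lower, new_upper, swaps) else (new_upper, new_lower, swaps)

-- ===== PRECONDITION & SPEC =====
-- Pre_ excludes q0 = q1, on which A's while-loop never terminates (Python hangs).
def Pre_convert_two_qubits_to_adjacent (q0 : Int) (q1 : Int) : Prop := q0 ≠ q1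
instance (q0 : Int) (q1 : Int) : Decidable (Pre_convert_two_qubits_to_adjacent q0 q1) := by unfold Pre_convert_two_qubits_to_adjacent; infer_instance
def pvWitness_convert_two_qubits_to_adjacent : Int × Int := (0, 5)

def Spec_convert_two_qubits_to_adjacent (q0 : Int) (q1 : Int) (out : Int × Int × (List (Int × Int))) : Prop := out = convert_two_qubits_to_adjacent_alt q0 q1
instance (q0 : Int) (q1 : Int) (out : Int × Int × (List (Int × Int))) : Decidable (Spec_convert_two_qubits_to_adjacent q0 q1 out) := by unfold Spec_convert_two_qubits_to_adjacent; infer_instance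

-- ===== CLAIM (what is proved, stated in full; the proofs are below) =====
def Claim_equal_convert_two_qubits_to_adjacent : Prop := ∀ (q0 : Int) (q1 : Int), Dom_convert_two_qubits_to_adjacent q0 q1 → Pre_convert_two_qubits_to_adjacent q0 q1 → Spec_convert_two_qubits_to_adjacent q0 q1 (convert_two_qubits_to_adjacent q0 q1)

-- ===== LEMMAS AND PROOFS =====

-- A's loop computes the closed-form midpoint whenever the gap is at least 2.
theorem pvALoop_closed (n : Nat) : ∀ (upper lower : Int), (upper - lower).toNat = n →
    1 ≤ upper - lower →
    pvALoop upper lower = (lower + (upper - lower - 1) / 2 + 1, lower + (upper - lower - 1) / 2) := by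
  induction n using Nat.strong_induction_on with
  | _ n ih =>
    intro upper lower hn h2
    rw [pvALoop]
    by_cases h1' : upper - lower = 1
    · rw [if_pos h1']
      simp only [Prod.mk.injEq]
      constructor <;> omega
    · have h2' : 2 ≤ upper - lower := by omega
      rw [if_neg h1', dif_pos h2']
      by_cases h3 : (upper - 1) - lower = 1
      · rw [if_pos h3]
        simp only [Prod.mk.injEq]
        constructor <;> omega
      · rw [if_neg h3]
        have h4 : 1 ≤ (upper - 1) - (lower + 1) := by omega
        have := ih ((upper - 1 - (lower + 1)).toNat) (by omega) (upper - 1) (lower + 1) rfl h4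
        rw [this]
        simp only [Prod.mk.injEq]
        constructor <;> omega

-- ===== VERDICT (by name: the statement is the Claim_ definition above) =====
theorem convert_two_qubits_to_adjacent_spec : Claim_equal_convert_two_qubits_to_adjacent := by
  intro q0 q1 _ hpre
  unfold Spec_convert_two_qubits_to_adjacent
  unfold convert_two_qubits_to_adjacent convert_two_qubits_to_adjacent_alt
  have hfd : PySem.Int.floordiv (max q0 q1 - min q0 q1 - 1) 2 = (max q0 q1 - min q0 q1 - 1) / 2 :=
    PySem.Int.floordiv_eq_ediv_of_pos (by omega)
  by_cases h1 : (q1 - q0).natAbs = 1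
  · have hd : max q0 q1 - min q0 q1 = 1 := by
      simp only [max_def, min_def]
      split_ifs <;> omega
    simp [h1, hd]
  · have hne : q0 ≠ q1 := hpre
    have h2 : 2 ≤ max q0 q1 - min q0 q1 := by
      simp only [max_def, min_def]
      split_ifs <;> omega
    have hd1 : ¬ (max q0 q1 - min q0 q1 = 1) := by intro h; linarith
    rw [if_neg h1, if_neg hd1]
    rw [pvALoop_closed ((max q0 q1 - min q0 q1).toNat) _ _ rfl (by linarith), hfd]
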